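-- pv_equiv track=rewrite | github.com/oomer/oomerfarm-flamenco | python/bella_submitter.py | parse_frame_index_spec
-- ===== SOURCE A (Python) =====
-- from typing import Any, Dict, List, NamedTuple, Optional, Tuple
--
-- def parse_frame_index_spec(spec: str) -> List[int]:
--     """Parse a 1-based frame index list for ``select_sequence_for_render`` (e.g. ``1,3,5-7``)."""
--     acc = set()
--     s = (spec or "").strip()
--     if not s:
--         return []
--     for part in s.split(","):
--         p = part.strip()
--         if not p:
--             continue
--         if "-" in p:
--             a, b = p.split("-", 1)
--             lo, hi = int(a.strip()), int(b.strip())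
--             for i in range(min(lo, hi), max(lo, hi) + 1):
--                 acc.add(i)
--         else:
--             acc.add(int(p))
--     return sorted(acc)
-- ===== SOURCE B (Python) =====
-- def parse_frame_index_spec(spec):
--     """Parse a 1-based frame index spec like '1,3,5-7' by merging sorted intervals."""
--     s = (spec or "").strip()
--     if not s:
--         return []
--     intervals = []
--     for part in s.split(","):
--         p = part.strip()
--         if not p:
--             continue
--         if "-" in p:
--             a, b = p.split("-", 1)
--             x, y = int(a.strip()), int(b.strip())
--             intervals.append((min(x, y), max(x, y)))
--         else:
--             n = int(p)
--             intervals.append((n, n))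
--     if not intervals:
--         return []
--     intervals.sort(key=lambda t: t[0])
--     out = []
--     cur_lo, cur_hi = intervals[0]
--     for lo, hi in intervals[1:]:
--         if lo <= cur_hi:
--             if hi > cur_hi:
--                 cur_hi = hi
--         else:
--             out.extend(range(cur_lo, cur_hi + 1))
--             cur_lo, cur_hi = lo, hi
--     out.extend(range(cur_lo, cur_hi + 1))
--     return out
-- ===== Notes on version B (the rewrite author's own statement) =====
-- stated objective: alternative
-- what changed: Replaces the per-frame hash set plus final sort over all frames with an interval representation: each part becomes one (lo,hi) pair, the pairs are sorted by lo and swept once merging overlaps, and the sorted result is emitted directly by expanding the merged disjoint intervals; no set and no sort over individual frames. Pre_ only excludes inputs where A raises ValueError (a part that is not an integer or a pair of integers), where both programs raise identically.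
import Mathlib
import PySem

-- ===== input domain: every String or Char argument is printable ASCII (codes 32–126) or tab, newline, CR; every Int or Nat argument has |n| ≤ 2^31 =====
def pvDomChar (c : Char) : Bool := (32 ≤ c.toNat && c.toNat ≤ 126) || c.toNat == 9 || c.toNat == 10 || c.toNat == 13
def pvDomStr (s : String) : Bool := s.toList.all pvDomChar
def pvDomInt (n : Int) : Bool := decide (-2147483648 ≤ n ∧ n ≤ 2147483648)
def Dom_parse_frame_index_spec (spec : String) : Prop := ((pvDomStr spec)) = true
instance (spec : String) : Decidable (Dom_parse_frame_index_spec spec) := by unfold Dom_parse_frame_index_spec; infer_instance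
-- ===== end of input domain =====

-- B replaces A's per-frame hash set + final sort by parsing each part into an (lo,hi) interval,
-- sorting the intervals by lo and sweeping once, merging overlaps and expanding the merged
-- disjoint intervals in order (alternative algorithm, same result).


-- ===== PORT A =====
-- one iteration of A's for-loop; `none` threads a ValueError from int()
def pvA_step (acc? : Option (PySem.Set Int)) (part : String) : Option (PySem.Set Int) :=
  match acc? with
  | none => none
  | some acc =>
    let p := PySem.Str.strip part
    if p = "" then some acc
    else if PySem.Str.isIn "-" p then
      match PySem.Str.splitMax? p "-" 1 with
      | some (a :: b :: _) =>
        match PySem.Int.ofStr? (PySem.Str.strip a), PySem.Int.ofStr? (PySem.Str.strip b) with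
        | some lo, some hi =>
            some ((PySem.List.pyRange (min lo hi) (max lo hi + 1) 1).foldl PySem.Set.add acc)
        | _, _ => none
      | _ => none
    else
      match PySem.Int.ofStr? p with
      | some n => some (PySem.Set.add acc n)
      | none => none

def parse_frame_index_spec (spec : String) : List Int :=
  let s := PySem.Str.strip spec
  if s = "" then []
  else
    match ((PySem.Str.split? s ",").getD []).foldl pvA_step (some PySem.Set.empty) with
    | some acc => PySem.List.sorted acc (fun x => x) false
    | none => []  -- ValueError; excluded by Pre_

-- ===== PORT B =====
-- one iteration of B's collection loop; `none` threads a ValueError from int()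
def pvB_collect (ivs? : Option (List (Int × Int))) (part : String) : Option (List (Int × Int)) :=
  match ivs? with
  | none => none
  | some ivs =>
    let p := PySem.Str.strip part
    if p = "" then some ivs
    else if PySem.Str.isIn "-" p then
      match PySem.Str.splitMax? p "-" 1 with
      | some (a :: b :: _) =>
        match PySem.Int.ofStr? (PySem.Str.strip a), PySem.Int.ofStr? (PySem.Str.strip b) with
        | some x, some y => some (ivs ++ [(min x y, max x y)])
        | _, _ => none
      | _ => none
    else
      match PySem.Int.ofStr? p with
      | some n => some (ivs ++ [(n, n)])
      | none => none

-- one iteration of B's merging sweep: state (out, cur_lo, cur_hi)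
def pvB_merge (st : List Int × Int × Int) (iv : Int × Int) : List Int × Int × Int :=
  if iv.1 ≤ st.2.2 then
    if st.2.2 < iv.2 then (st.1, st.2.1, iv.2) else st
  else (st.1 ++ PySem.List.pyRange st.2.1 (st.2.2 + 1) 1, iv.1, iv.2)

def parse_frame_index_spec_alt (spec : String) : List Int :=
  let s := PySem.Str.strip spec
  if s = "" then []
  else
    match ((PySem.Str.split? s ",").getD []).foldl pvB_collect (some []) with
    | none => []  -- ValueError; excluded by Pre_
    | some ivs =>
      match PySem.List.sorted ivs (fun t => t.1) false with
      | [] => []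
      | iv0 :: rest =>
        let st := rest.foldl pvB_merge ([], iv0.1, iv0.2)
        st.1 ++ PySem.List.pyRange st.2.1 (st.2.2 + 1) 1

-- ===== PRECONDITION & SPEC =====
-- Pre_ excludes exactly the inputs on which A raises ValueError (a non-empty part that is not
-- an int literal, or, containing '-', does not split into two int literals).
def pvPartOK (part : String) : Bool :=
  let p := PySem.Str.strip part
  if p = "" then true
  else if PySem.Str.isIn "-" p then
    match PySem.Str.splitMax? p "-" 1 with
    | some (a :: b :: _) =>
      (PySem.Int.ofStr? (PySem.Str.strip a)).isSome && (PySem.Int.ofStr? (PySem.Str.strip b)).isSome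
    | _ => false
  else (PySem.Int.ofStr? p).isSome

def Pre_parse_frame_index_spec (spec : String) : Prop :=
  ((PySem.Str.split? (PySem.Str.strip spec) ",").getD []).all pvPartOK = true

instance (spec : String) : Decidable (Pre_parse_frame_index_spec spec) := by
  unfold Pre_parse_frame_index_spec; infer_instance

def pvWitness_parse_frame_index_spec : String := "1, 3,7-5,6-9"

def Spec_parse_frame_index_spec (spec : String) (out : List Int) : Prop := out = parse_frame_index_spec_alt spec
instance (spec : String) (out : List Int) : Decidable (Spec_parse_frame_index_spec spec out) := by unfold Spec_parse_frame_index_spec; infer_instance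

-- ===== CLAIM (what is proved, stated in full; the proofs are below) =====
def Claim_equal_parse_frame_index_spec : Prop := ∀ (spec : String), Dom_parse_frame_index_spec spec → Pre_parse_frame_index_spec spec → Spec_parse_frame_index_spec spec (parse_frame_index_spec spec)

-- ===== LEMMAS AND PROOFS =====

-- proof-side view of one part: none = skipped (blank), some (lo,hi) = the normalized interval
def pvIv (part : String) : Option (Int × Int) :=
  let p := PySem.Str.strip part
  if p = "" then none
  else if PySem.Str.isIn "-" p then
    match PySem.Str.splitMax? p "-" 1 with
    | some (a :: b :: _) =>
      match PySem.Int.ofStr? (PySem.Str.strip a), PySem.Int.ofStr? (PySem.Str.strip b) with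
      | some x, some y => some (min x y, max x y)
      | _, _ => none
    | _ => none
  else
    match PySem.Int.ofStr? p with
    | some n => some (n, n)
    | none => none

-- A's loop body, totalized on parts that parse
def pvA_total (acc : PySem.Set Int) (part : String) : PySem.Set Int :=
  match pvIv part with
  | none => acc
  | some iv => (PySem.List.pyRange iv.1 (iv.2 + 1) 1).foldl PySem.Set.add acc

lemma pvIv_lohi (part : String) (iv : Int × Int) (h : pvIv part = some iv) : iv.1 ≤ iv.2 := by
  unfold pvIv at h
  by_cases hp : PySem.Str.strip part = ""
  · simp [hp] at h
  · rw [if_neg hp] at h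
    by_cases hd : PySem.Str.isIn "-" (PySem.Str.strip part) = true
    · rw [if_pos hd] at h
      cases hsp : PySem.Str.splitMax? (PySem.Str.strip part) "-" 1 with
      | none => rw [hsp] at h; simp at h
      | some l =>
        rw [hsp] at h
        rcases l with _ | ⟨a, _ | ⟨b, t⟩⟩
        · simp at h
        · simp at h
        · cases hlo : PySem.Int.ofStr? (PySem.Str.strip a) with
          | none => simp [hlo] at h
          | some lo =>
            cases hhi : PySem.Int.ofStr? (PySem.Str.strip b) with
            | none => simp [hlo, hhi] at h
            | some hi =>
              simp only [hlo, hhi, Option.some_inj] at h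
              subst h; exact min_le_max
    · rw [if_neg hd] at h
      cases hn : PySem.Int.ofStr? (PySem.Str.strip part) with
      | none => simp [hn] at h
      | some n =>
        simp only [hn, Option.some_inj] at h
        subst h; exact le_refl n

lemma pvA_step_ok (acc : PySem.Set Int) (part : String) (h : pvPartOK part = true) :
    pvA_step (some acc) part = some (pvA_total acc part) := by
  unfold pvPartOK at h
  unfold pvA_step pvA_total pvIv
  by_cases hp : PySem.Str.strip part = ""
  · simp only [if_pos hp]
  · rw [if_neg hp] at h
    simp only [if_neg hp]
    by_cases hd : PySem.Str.isIn "-" (PySem.Str.strip part) = true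
    · rw [if_pos hd] at h
      simp only [if_pos hd]
      cases hsp : PySem.Str.splitMax? (PySem.Str.strip part) "-" 1 with
      | none => rw [hsp] at h; simp at h
      | some l =>
        rw [hsp] at h
        rcases l with _ | ⟨a, _ | ⟨b, t⟩⟩
        · simp at h
        · simp at h
        · simp only [Bool.and_eq_true, Option.isSome_iff_exists] at h
          obtain ⟨⟨lo, hlo⟩, ⟨hi, hhi⟩⟩ := h
          simp only [hlo, hhi]
    · rw [if_neg hd] at h
      simp only [if_neg hd]
      rw [Option.isSome_iff_exists] at h
      obtain ⟨n, hn⟩ := h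
      simp only [hn, PySem.List.pyRange_one_singleton, List.foldl_cons, List.foldl_nil]

lemma pvB_collect_ok (ivs : List (Int × Int)) (part : String) (h : pvPartOK part = true) :
    pvB_collect (some ivs) part = some (ivs ++ (pvIv part).toList) := by
  unfold pvPartOK at h
  unfold pvB_collect pvIv
  by_cases hp : PySem.Str.strip part = ""
  · simp only [if_pos hp, Option.toList_none, List.append_nil]
  · rw [if_neg hp] at h
    simp only [if_neg hp]
    by_cases hd : PySem.Str.isIn "-" (PySem.Str.strip part) = true
    · rw [if_pos hd] at h
      simp only [if_pos hd]
      cases hsp : PySem.Str.splitMax? (PySem.Str.strip part) "-" 1 with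
      | none => rw [hsp] at h; simp at h
      | some l =>
        rw [hsp] at h
        rcases l with _ | ⟨a, _ | ⟨b, t⟩⟩
        · simp at h
        · simp at h
        · simp only [Bool.and_eq_true, Option.isSome_iff_exists] at h
          obtain ⟨⟨lo, hlo⟩, ⟨hi, hhi⟩⟩ := h
          simp only [hlo, hhi, Option.toList_some]
    · rw [if_neg hd] at h
      simp only [if_neg hd]
      rw [Option.isSome_iff_exists] at h
      obtain ⟨n, hn⟩ := h
      simp only [hn, Option.toList_some]

lemma pvA_fold_ok (parts : List String) (acc : PySem.Set Int) (h : parts.all pvPartOK = true) :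
    parts.foldl pvA_step (some acc) = some (parts.foldl pvA_total acc) := by
  induction parts generalizing acc with
  | nil => rfl
  | cons p t ih =>
    simp only [List.all_cons, Bool.and_eq_true] at h
    simp only [List.foldl_cons, pvA_step_ok acc p h.1]
    exact ih _ h.2

lemma pvB_fold_ok (parts : List String) (ivs : List (Int × Int)) (h : parts.all pvPartOK = true) :
    parts.foldl pvB_collect (some ivs) = some (ivs ++ parts.filterMap pvIv) := by
  induction parts generalizing ivs with
  | nil => simp
  | cons p t ih =>
    simp only [List.all_cons, Bool.and_eq_true] at h
    simp only [List.foldl_cons, pvB_collect_ok ivs p h.1]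
    rw [ih _ h.2]
    cases hp : pvIv p <;> simp [hp]

lemma mem_foldl_set_add (l : List Int) (s : PySem.Set Int) (x : Int) :
    x ∈ l.foldl PySem.Set.add s ↔ x ∈ s ∨ x ∈ l := by
  induction l generalizing s with
  | nil => simp
  | cons a t ih =>
    simp only [List.foldl_cons, ih, PySem.Set.mem_add, List.mem_cons]
    tauto

lemma nodup_foldl_set_add (l : List Int) (s : PySem.Set Int) (h : s.Nodup) :
    (l.foldl PySem.Set.add s).Nodup := by
  induction l generalizing s with
  | nil => exact h
  | cons a t ih => exact ih _ (PySem.Set.nodup_add s a h)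

-- coverage: x is in some parsed interval of parts
def pvCov (parts : List String) (x : Int) : Prop :=
  ∃ iv ∈ parts.filterMap pvIv, iv.1 ≤ x ∧ x ≤ iv.2

lemma mem_pvA_fold (parts : List String) (acc : PySem.Set Int) (x : Int) :
    x ∈ parts.foldl pvA_total acc ↔ x ∈ acc ∨ pvCov parts x := by
  induction parts generalizing acc with
  | nil => simp [pvCov]
  | cons p t ih =>
    simp only [List.foldl_cons, ih, pvCov, List.filterMap_cons]
    cases hp : pvIv p with
    | none => simp [pvA_total, hp]
    | some iv =>
      simp only [pvA_total, hp, List.mem_cons, mem_foldl_set_add, PySem.List.mem_pyRange_one]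
      constructor
      · rintro (⟨h | h⟩ | h)
        · exact Or.inl h
        · exact Or.inr ⟨iv, by simp, by omega⟩
        · obtain ⟨jv, hjv, hx⟩ := h
          exact Or.inr ⟨jv, by simp [hjv], hx⟩
      · rintro (h | ⟨jv, hjv, hx⟩)
        · exact Or.inl (Or.inl h)
        · rcases hjv with h | h
          · subst h; exact Or.inl (Or.inr (by omega))
          · exact Or.inr ⟨jv, h, hx⟩

lemma nodup_pvA_fold (parts : List String) (acc : PySem.Set Int) (h : acc.Nodup) :
    (parts.foldl pvA_total acc).Nodup := by
  induction parts generalizing acc with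
  | nil => exact h
  | cons p t ih =>
    refine ih _ ?_
    unfold pvA_total
    cases pvIv p
    · exact h
    · exact nodup_foldl_set_add _ _ h

-- the merging sweep: strictly increasing output covering exactly out ∪ [lo,hi] ∪ rest
lemma pvB_merge_spec (rest : List (Int × Int)) (out : List Int) (lo hi : Int)
    (hout : out.Pairwise (· < ·))
    (hout_lo : ∀ x ∈ out, x < lo)
    (hlohi : lo ≤ hi)
    (hrest1 : ∀ iv ∈ rest, iv.1 ≤ iv.2)
    (hrest2 : ∀ iv ∈ rest, lo ≤ iv.1)
    (hrest3 : rest.Pairwise (fun a b => a.1 ≤ b.1)) :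
    ((rest.foldl pvB_merge (out, lo, hi)).1 ++
      PySem.List.pyRange (rest.foldl pvB_merge (out, lo, hi)).2.1
        ((rest.foldl pvB_merge (out, lo, hi)).2.2 + 1) 1).Pairwise (· < ·) ∧
    ∀ x, (x ∈ (rest.foldl pvB_merge (out, lo, hi)).1 ++
      PySem.List.pyRange (rest.foldl pvB_merge (out, lo, hi)).2.1
        ((rest.foldl pvB_merge (out, lo, hi)).2.2 + 1) 1 ↔
      x ∈ out ∨ (lo ≤ x ∧ x ≤ hi) ∨ ∃ iv ∈ rest, iv.1 ≤ x ∧ x ≤ iv.2) := by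
  induction rest generalizing out lo hi with
  | nil =>
    constructor
    · rw [List.pairwise_append]
      refine ⟨hout, PySem.List.pairwise_lt_pyRange_one _ _, ?_⟩
      intro x hx y hy
      have := hout_lo x hx
      have : lo ≤ y ∧ y < hi + 1 := PySem.List.mem_pyRange_one.mp hy
      omega
    · intro x
      simp only [List.foldl_nil, List.mem_append, PySem.List.mem_pyRange_one]
      constructor
      · rintro (h | h)
        · exact Or.inl h
        · exact Or.inr (Or.inl (by omega))
      · rintro (h | h | ⟨jv, hjv, _⟩)
        · exact Or.inl h
        · exact Or.inr (by omega)
        · exact absurd hjv (List.not_mem_nil)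
  | cons iv t ih =>
    rw [List.pairwise_cons] at hrest3
    simp only [List.foldl_cons]
    by_cases hcase : iv.1 ≤ hi
    · -- merge: cur_hi becomes max hi iv.2
      have hstep : pvB_merge (out, lo, hi) iv = (out, lo, max hi iv.2) := by
        unfold pvB_merge
        simp only [hcase, if_pos]
        split_ifs with h2 <;> simp <;> omega
      rw [hstep]
      have hiv1 : iv.1 ≤ iv.2 := hrest1 iv (by simp)
      have hiv2 : lo ≤ iv.1 := hrest2 iv (by simp)
      obtain ⟨hpw, hmem⟩ := ih out lo (max hi iv.2) hout
        (by intro x hx; exact hout_lo x hx)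
        (by omega)
        (fun jv hjv => hrest1 jv (by simp [hjv]))
        (fun jv hjv => hrest2 jv (by simp [hjv]))
        hrest3.2
      refine ⟨hpw, fun x => ?_⟩
      rw [hmem x]
      constructor
      · rintro (h | h | h)
        · exact Or.inl h
        · by_cases hx : x ≤ hi
          · exact Or.inr (Or.inl ⟨h.1, hx⟩)
          · exact Or.inr (Or.inr ⟨iv, by simp, by omega⟩)
        · obtain ⟨jv, hjv, hx⟩ := h
          exact Or.inr (Or.inr ⟨jv, by simp [hjv], hx⟩)
      · rintro (h | h | ⟨jv, hjv, hx⟩)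
        · exact Or.inl h
        · exact Or.inr (Or.inl (by omega))
        · rcases List.mem_cons.mp hjv with h | h
          · subst h; exact Or.inr (Or.inl (by omega))
          · exact Or.inr (Or.inr ⟨jv, h, hx⟩)
    · -- flush: emit [lo,hi], start over at iv
      have hstep : pvB_merge (out, lo, hi) iv =
          (out ++ PySem.List.pyRange lo (hi + 1) 1, iv.1, iv.2) := by
        unfold pvB_merge
        simp only [if_neg (by omega : ¬ iv.1 ≤ hi)]
      rw [hstep]
      have hiv1 : iv.1 ≤ iv.2 := hrest1 iv (by simp)
      have hout' : (out ++ PySem.List.pyRange lo (hi + 1) 1).Pairwise (· < ·) := by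
        rw [List.pairwise_append]
        refine ⟨hout, PySem.List.pairwise_lt_pyRange_one _ _, ?_⟩
        intro x hx y hy
        have := hout_lo x hx
        have : lo ≤ y ∧ y < hi + 1 := PySem.List.mem_pyRange_one.mp hy
        omega
      have hout_lo' : ∀ x ∈ out ++ PySem.List.pyRange lo (hi + 1) 1, x < iv.1 := by
        intro x hx
        rcases List.mem_append.mp hx with h | h
        · have := hout_lo x h; omega
        · have : lo ≤ x ∧ x < hi + 1 := PySem.List.mem_pyRange_one.mp h; omega
      obtain ⟨hpw, hmem⟩ := ih (out ++ PySem.List.pyRange lo (hi + 1) 1) iv.1 iv.2 hout'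
        hout_lo' hiv1
        (fun jv hjv => hrest1 jv (by simp [hjv]))
        (fun jv hjv => hrest3.1 jv hjv)
        hrest3.2
      refine ⟨hpw, fun x => ?_⟩
      rw [hmem x]
      simp only [List.mem_append, PySem.List.mem_pyRange_one]
      constructor
      · rintro ((h | h) | h | h)
        · exact Or.inl h
        · exact Or.inr (Or.inl (by omega))
        · exact Or.inr (Or.inr ⟨iv, by simp, h⟩)
        · obtain ⟨jv, hjv, hx⟩ := h
          exact Or.inr (Or.inr ⟨jv, by simp [hjv], hx⟩)
      · rintro (h | h | ⟨jv, hjv, hx⟩)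
        · exact Or.inl (Or.inl h)
        · exact Or.inl (Or.inr (by omega))
        · rcases List.mem_cons.mp hjv with h | h
          · subst h; exact Or.inr (Or.inl hx)
          · exact Or.inr (Or.inr ⟨jv, h, hx⟩)

-- ===== VERDICT (by name: the statement is the Claim_ definition above) =====
theorem parse_frame_index_spec_spec : Claim_equal_parse_frame_index_spec := by
  intro spec _ hpre
  unfold Spec_parse_frame_index_spec parse_frame_index_spec parse_frame_index_spec_alt
  by_cases hs : PySem.Str.strip spec = ""
  · rw [if_pos hs, if_pos hs]
  · rw [if_neg hs, if_neg hs]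
    unfold Pre_parse_frame_index_spec at hpre
    set parts := (PySem.Str.split? (PySem.Str.strip spec) ",").getD [] with hparts
    rw [pvA_fold_ok parts PySem.Set.empty hpre, pvB_fold_ok parts [] hpre]
    simp only [List.nil_append]
    set acc := parts.foldl pvA_total PySem.Set.empty with hacc
    set ivs := parts.filterMap pvIv with hivs
    have hacc_mem : ∀ x, x ∈ acc ↔ pvCov parts x := by
      intro x; rw [hacc, mem_pvA_fold]; simp [PySem.Set.empty]
    have hacc_nodup : acc.Nodup := nodup_pvA_fold parts _ (by simp [PySem.Set.empty])
    cases hsort : PySem.List.sorted ivs (fun t => t.1) false with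
    | nil =>
      have hnil : ivs = [] := (PySem.List.sorted_eq_nil_iff _ _ _).mp hsort
      have hacc0 : acc = [] := by
        rw [List.eq_nil_iff_forall_not_mem]
        intro x hx
        obtain ⟨iv, hiv, _⟩ := (hacc_mem x).mp hx
        rw [← hivs, hnil] at hiv
        exact absurd hiv (List.not_mem_nil)
      rw [hacc0]
      rfl
    | cons iv0 rest =>
      have hpw_all : (iv0 :: rest).Pairwise (fun a b : Int × Int => a.1 ≤ b.1) := by
        rw [← hsort]
        exact PySem.List.sorted_pairwise ivs (fun t : Int × Int => t.1)
      rw [List.pairwise_cons] at hpw_all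
      have hmem_sivs : ∀ jv : Int × Int, jv ∈ iv0 :: rest ↔ jv ∈ ivs := by
        intro jv; rw [← hsort]; exact PySem.List.mem_sorted ivs _ false jv
      have hlohi : ∀ jv : Int × Int, jv ∈ iv0 :: rest → jv.1 ≤ jv.2 := by
        intro jv hjv
        obtain ⟨part, hpart, hiv⟩ := List.mem_filterMap.mp (hivs ▸ (hmem_sivs jv).mp hjv)
        exact pvIv_lohi part jv hiv
      obtain ⟨hpw, hmem⟩ := pvB_merge_spec rest [] iv0.1 iv0.2
        (List.Pairwise.nil)
        (by intro x hx; exact absurd hx (List.not_mem_nil))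
        (hlohi iv0 (by simp))
        (fun jv hjv => hlohi jv (by simp [hjv]))
        (fun jv hjv => hpw_all.1 jv hjv)
        hpw_all.2
      apply PySem.List.sorted_eq_of_perm_of_pairwise_lt
      · rw [(List.perm_ext_iff_of_nodup (hpw.imp (fun {a b} h => ne_of_lt h)) hacc_nodup)]
        intro x
        rw [hmem x, hacc_mem x]
        unfold pvCov
        rw [← hivs]
        constructor
        · rintro (h | h | ⟨jv, hjv, hx⟩)
          · exact absurd h (List.not_mem_nil)
          · exact ⟨iv0, (hmem_sivs iv0).mp (by simp), h⟩
          · exact ⟨jv, (hmem_sivs jv).mp (by simp [hjv]), hx⟩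
        · rintro ⟨jv, hjv, hx⟩
          rcases List.mem_cons.mp ((hmem_sivs jv).mpr hjv) with h | h
          · subst h; exact Or.inr (Or.inl hx)
          · exact Or.inr (Or.inr ⟨jv, h, hx⟩)
      · exact hpw
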